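-- pv_equiv track=rewrite | github.com/tamaki-jpg/stress-check-app | utils/stress_text.py | _b_summary
-- ===== SOURCE A (Python) =====
-- def _b_summary(sumB, b_problems, is_high_stress):
--     if sumB >= 24:
--         text = (
--             '心身のストレス反応について、特に異常なサインは見られず、健康的な状態です。'
--             '引き続きご自身のケアを大切にしてください。'
--         )
--         if is_high_stress:
--             text += '　なお高ストレス者判定に該当しているため、産業医への面接指導もご検討ください。'
--         return 'good', f'{sumB} 点　良好', text
--     elif sumB >= 18:
--         base = '心身のストレス反応は中程度です。'
--         if b_problems:
--             labels = '・'.join(p['label'] for p in b_problems)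
--             base += f'「{labels}」については意識的にセルフケアを行いましょう。'
--         if is_high_stress:
--             base += '産業医への面接指導もあわせてご検討ください。'
--         return 'mid', f'{sumB} 点　中程度', base
--     elif sumB >= 13:
--         base = '心身のストレス反応が高めの状態です。十分な休息と気分転換を心がけてください。'
--         if b_problems:
--             labels = '・'.join(p['label'] for p in b_problems)
--             base += f'「{labels}」の傾向がみられます。'
--         if is_high_stress:
--             base += '産業医への面接指導を積極的にご検討ください。'
--         return 'high', f'{sumB} 点　高い', base
--     else:
--         base = '心身のストレス反応が著しく高い状態です。早急に休息を確保し、産業医への相談を強くお勧めします。'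
--         if b_problems:
--             labels = '・'.join(p['label'] for p in b_problems)
--             base += f'特に「{labels}」が顕著にみられます。'
--         return 'very_high', f'{sumB} 点　著しく高い', base
-- ===== SOURCE B (Python) =====
-- # Arithmetic-rank rewrite: the band index is COMPUTED (a sum of threshold
-- # comparisons, no if/elif ladder and no band scan); the three result fields are
-- # looked up in parallel tuples and the message is assembled as a join of a
-- # parts list built from two uniform rules (objective: simpler).
--
-- CODES = ('very_high', 'high', 'mid', 'good')
-- TITLES = ('著しく高い', '高い', '中程度', '良好')
-- BASES = (
--     '心身のストレス反応が著しく高い状態です。早急に休息を確保し、産業医への相談を強くお勧めします。',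
--     '心身のストレス反応が高めの状態です。十分な休息と気分転換を心がけてください。',
--     '心身のストレス反応は中程度です。',
--     '心身のストレス反応について、特に異常なサインは見られず、健康的な状態です。'
--     '引き続きご自身のケアを大切にしてください。',
-- )
-- # problem-label wrapping (prefix, suffix); only tiers 0..2 use b_problems
-- WRAPS = (
--     ('特に「', '」が顕著にみられます。'),
--     ('「', '」の傾向がみられます。'),
--     ('「', '」については意識的にセルフケアを行いましょう。'),
-- )
-- # high-stress tail; only tiers 1..3 use is_high_stress (index shifted by 1)
-- HS = (
--     '産業医への面接指導を積極的にご検討ください。',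
--     '産業医への面接指導もあわせてご検討ください。',
--     '　なお高ストレス者判定に該当しているため、産業医への面接指導もご検討ください。',
-- )
--
--
-- def _b_summary(sumB, b_problems, is_high_stress):
--     tier = (sumB >= 13) + (sumB >= 18) + (sumB >= 24)
--     parts = [BASES[tier]]
--     if b_problems and tier < 3:
--         pre, post = WRAPS[tier]
--         parts.append(pre + '・'.join(p['label'] for p in b_problems) + post)
--     if is_high_stress and tier > 0:
--         parts.append(HS[tier - 1])
--     return CODES[tier], f'{sumB} 点　{TITLES[tier]}', ''.join(parts)
-- ===== Notes on version B (the rewrite author's own statement) =====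
-- stated objective: simpler
-- what changed: Replaced the four-way if/elif ladder by an arithmetically computed tier rank (sum of three threshold comparisons) that indexes parallel tuples of codes/titles/base texts, with the message assembled as a join of a parts list built by two uniform rules (problem wrap for tiers <3, high-stress tail for tiers >0) instead of per-branch concatenation.
import Mathlib
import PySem

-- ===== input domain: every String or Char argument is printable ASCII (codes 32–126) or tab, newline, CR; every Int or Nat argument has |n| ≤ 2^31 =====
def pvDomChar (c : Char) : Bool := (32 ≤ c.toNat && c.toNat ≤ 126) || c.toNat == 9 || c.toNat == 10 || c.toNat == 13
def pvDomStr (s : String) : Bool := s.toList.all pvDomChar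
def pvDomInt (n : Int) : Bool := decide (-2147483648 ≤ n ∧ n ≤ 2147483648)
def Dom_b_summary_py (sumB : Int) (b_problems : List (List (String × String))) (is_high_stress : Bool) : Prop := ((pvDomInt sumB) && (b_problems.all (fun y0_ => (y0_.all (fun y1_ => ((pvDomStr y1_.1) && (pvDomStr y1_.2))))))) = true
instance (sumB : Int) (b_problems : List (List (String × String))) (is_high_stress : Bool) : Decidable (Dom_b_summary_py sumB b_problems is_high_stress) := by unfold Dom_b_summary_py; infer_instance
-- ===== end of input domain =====

-- B replaces A's four-way if/elif ladder by an arithmetically computed tier rank indexing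
-- parallel tuples, with the message joined from a parts list (objective: simpler).

-- shared subexpression of both Pythons: '・'.join(p['label'] for p in b_problems);
-- p['label'] is a first-match dict lookup; the getD "" default is never reached inside
-- Pre_b_summary_py (every p carries a "label" key there)
def pvLabels (b_problems : List (List (String × String))) : String :=
  String.intercalate "・"
    (b_problems.map (fun p => (((p.find? (fun kv => kv.1 == "label")).map (·.2)).getD "")))

-- ===== PORT A =====
def b_summary_py (sumB : Int) (b_problems : List (List (String × String))) (is_high_stress : Bool) : String × String × String :=
  if sumB ≥ 24 then
    let text := "心身のストレス反応について、特に異常なサインは見られず、健康的な状態です。引き続きご自身のケアを大切にしてください。"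
    let text := if is_high_stress then text ++ "　なお高ストレス者判定に該当しているため、産業医への面接指導もご検討ください。" else text
    ("good", PySem.Int.toStr sumB ++ " 点　良好", text)
  else if sumB ≥ 18 then
    let base := "心身のストレス反応は中程度です。"
    let base := if !b_problems.isEmpty then base ++ ("「" ++ pvLabels b_problems ++ "」については意識的にセルフケアを行いましょう。") else base
    let base := if is_high_stress then base ++ "産業医への面接指導もあわせてご検討ください。" else base
    ("mid", PySem.Int.toStr sumB ++ " 点　中程度", base)
  else if sumB ≥ 13 then
    let base := "心身のストレス反応が高めの状態です。十分な休息と気分転換を心がけてください。"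
    let base := if !b_problems.isEmpty then base ++ ("「" ++ pvLabels b_problems ++ "」の傾向がみられます。") else base
    let base := if is_high_stress then base ++ "産業医への面接指導を積極的にご検討ください。" else base
    ("high", PySem.Int.toStr sumB ++ " 点　高い", base)
  else
    let base := "心身のストレス反応が著しく高い状態です。早急に休息を確保し、産業医への相談を強くお勧めします。"
    let base := if !b_problems.isEmpty then base ++ ("特に「" ++ pvLabels b_problems ++ "」が顕著にみられます。") else base
    ("very_high", PySem.Int.toStr sumB ++ " 点　著しく高い", base)

-- ===== PORT B =====
def pvCodes : List String := ["very_high", "high", "mid", "good"]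
def pvTitles : List String := ["著しく高い", "高い", "中程度", "良好"]
def pvBases : List String :=
  [ "心身のストレス反応が著しく高い状態です。早急に休息を確保し、産業医への相談を強くお勧めします。",
    "心身のストレス反応が高めの状態です。十分な休息と気分転換を心がけてください。",
    "心身のストレス反応は中程度です。",
    "心身のストレス反応について、特に異常なサインは見られず、健康的な状態です。引き続きご自身のケアを大切にしてください。" ]
def pvWraps : List (String × String) :=
  [ ("特に「", "」が顕著にみられます。"),
    ("「", "」の傾向がみられます。"),
    ("「", "」については意識的にセルフケアを行いましょう。") ]
def pvHS : List String :=
  [ "産業医への面接指導を積極的にご検討ください。",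
    "産業医への面接指導もあわせてご検討ください。",
    "　なお高ストレス者判定に該当しているため、産業医への面接指導もご検討ください。" ]

def b_summary_py_alt (sumB : Int) (b_problems : List (List (String × String))) (is_high_stress : Bool) : String × String × String :=
  let tier : Nat := (if sumB ≥ 13 then 1 else 0) + (if sumB ≥ 18 then 1 else 0) + (if sumB ≥ 24 then 1 else 0)
  let parts : List String := [pvBases.getD tier ""]
  let parts := if !b_problems.isEmpty && tier < 3 then
      let w := pvWraps.getD tier ("", "")
      parts ++ [w.1 ++ pvLabels b_problems ++ w.2]
    else parts
  let parts := if is_high_stress && tier > 0 then parts ++ [pvHS.getD (tier - 1) ""] else parts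
  (pvCodes.getD tier "", PySem.Int.toStr sumB ++ " 点　" ++ pvTitles.getD tier "", String.join parts)

-- ===== PRECONDITION & SPEC =====
-- Pre_ excludes only inputs where Python A raises KeyError: sumB < 24 with a nonempty
-- b_problems containing a dict without a "label" key.
def Pre_b_summary_py (sumB : Int) (b_problems : List (List (String × String))) (is_high_stress : Bool) : Prop :=
  sumB ≥ 24 ∨ ∀ p ∈ b_problems, p.any (fun kv => kv.1 == "label") = true
instance (sumB : Int) (b_problems : List (List (String × String))) (is_high_stress : Bool) : Decidable (Pre_b_summary_py sumB b_problems is_high_stress) := by unfold Pre_b_summary_py; infer_instance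
def pvWitness_b_summary_py : Int × (List (List (String × String))) × Bool := (18, [[("label", "sleep")]], true)

def Spec_b_summary_py (sumB : Int) (b_problems : List (List (String × String))) (is_high_stress : Bool) (out : String × String × String) : Prop := out = b_summary_py_alt sumB b_problems is_high_stress
instance (sumB : Int) (b_problems : List (List (String × String))) (is_high_stress : Bool) (out : String × String × String) : Decidable (Spec_b_summary_py sumB b_problems is_high_stress out) := by unfold Spec_b_summary_py; infer_instance

-- ===== CLAIM (what is proved, stated in full; the proofs are below) =====
def Claim_equal_b_summary_py : Prop := ∀ (sumB : Int) (b_problems : List (List (String × String))) (is_high_stress : Bool), Dom_b_summary_py sumB b_problems is_high_stress → Pre_b_summary_py sumB b_problems is_high_stress → Spec_b_summary_py sumB b_problems is_high_stress (b_summary_py sumB b_problems is_high_stress)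

-- ===== LEMMAS AND PROOFS =====

-- ===== VERDICT (by name: the statement is the Claim_ definition above) =====
set_option maxRecDepth 4000 in
theorem b_summary_py_spec : Claim_equal_b_summary_py := by
  intro sumB bp hs _ _
  unfold Spec_b_summary_py b_summary_py b_summary_py_alt pvCodes pvTitles pvBases pvWraps pvHS
  by_cases h24 : sumB ≥ 24 <;> by_cases h18 : sumB ≥ 18 <;> by_cases h13 : sumB ≥ 13 <;>
    first
      | omega
      | (simp only [h24, h18, h13, if_true, if_false, ge_iff_le]
         cases bp <;> cases hs <;>
           simp [String.join, String.append_assoc])
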